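-- pv_equiv track=rewrite | github.com/Aristman/AI-intensive | telegram_monitoring_agent/src/agent.py | _cron_field_match
-- ===== SOURCE A (Python) =====
-- def _cron_field_match(value: int, spec: str, min_v: int, max_v: int) -> bool:
--     """Check if a single cron field spec matches a value."""
--     spec = spec.strip()
--     if spec == '*':
--         return True
--     def expand_token(token: str) -> set[int]:
--         # Handle step syntax
--         if '/' in token:
--             base, step_s = token.split('/', 1)
--             step = int(step_s)
--             if base == '*':
--                 rng = range(min_v, max_v + 1)
--             else:
--                 # range or single
--                 if '-' in base:
--                     a, b = base.split('-', 1)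
--                     rng = range(int(a), int(b) + 1)
--                 else:
--                     v = int(base)
--                     rng = range(v, v + 1)
--             return {v for v in rng if (v - min_v) % step == 0}
--         # Range
--         if '-' in token:
--             a, b = token.split('-', 1)
--             return set(range(int(a), int(b) + 1))
--         # Single number
--         return {int(token)}
--
--     allowed: set[int] = set()
--     for part in spec.split(','):
--         part = part.strip()
--         if not part:
--             continue
--         try:
--             allowed |= expand_token(part)
--         except Exception:
--             # invalid token -> no match
--             return False
--     return value in allowed
-- ===== SOURCE B (Python) =====
-- def _cron_field_match(value: int, spec: str, min_v: int, max_v: int) -> bool: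
--     """Check if a single cron field spec matches a value, testing each token directly."""
--     spec = spec.strip()
--     if spec == '*':
--         return True
--
--     def parse_range(base: str) -> tuple[int, int]:
--         if base == '*':
--             return min_v, max_v
--         if '-' in base:
--             a, b = base.split('-', 1)
--             return int(a), int(b)
--         v = int(base)
--         return v, v
--
--     def token_matches(token: str) -> bool:
--         if '/' in token:
--             base, step_s = token.split('/', 1)
--             step = int(step_s)
--             lo, hi = parse_range(base)
--             return any((v - min_v) % step == 0 and v == value
--                        for v in range(lo, hi + 1))
--         if '-' in token:
--             a, b = token.split('-', 1)
--             lo, hi = int(a), int(b)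
--             return lo <= value <= hi
--         return value == int(token)
--
--     matched = False
--     for part in spec.split(','):
--         token = part.strip()
--         if not token:
--             continue
--         try:
--             matched |= token_matches(token)
--         except Exception:
--             return False
--     return matched
-- ===== Notes on version B (the rewrite author's own statement) =====
-- stated objective: simpler
-- what changed: B drops A's accumulated allowed-set entirely: each token is tested directly against the value (a bounds check for ranges and singles, a short-circuiting scan of the base range for step tokens) and the results are OR-folded into a running boolean; all tokens are still parsed, so a later invalid token yields False.
import Mathlib
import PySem

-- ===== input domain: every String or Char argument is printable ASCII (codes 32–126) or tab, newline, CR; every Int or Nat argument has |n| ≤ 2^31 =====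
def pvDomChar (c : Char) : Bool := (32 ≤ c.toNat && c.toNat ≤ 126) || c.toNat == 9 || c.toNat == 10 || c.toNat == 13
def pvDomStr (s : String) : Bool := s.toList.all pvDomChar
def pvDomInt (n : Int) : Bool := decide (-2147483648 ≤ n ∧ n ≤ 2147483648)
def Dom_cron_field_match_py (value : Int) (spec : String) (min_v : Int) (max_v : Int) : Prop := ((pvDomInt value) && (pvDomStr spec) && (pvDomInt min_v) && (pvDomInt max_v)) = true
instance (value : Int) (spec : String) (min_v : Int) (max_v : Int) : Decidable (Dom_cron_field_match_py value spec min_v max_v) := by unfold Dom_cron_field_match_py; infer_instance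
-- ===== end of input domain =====

-- B drops A's accumulated allowed-set: each token is tested directly against the value and
-- the results are OR-folded into a running boolean; return values are identical.

-- ===== PORT A =====
-- expand_token: `none` is exactly where the Python helper raises (bad int(), or `% 0` on a
-- nonempty range — the set comprehension touches `step` only when rng has an element).
def pvExpandTokenA (token : String) (min_v max_v : Int) : Option (PySem.Set Int) :=
  if PySem.Str.isIn "/" token then
    -- '/' is in token, so split('/', 1) yields exactly two pieces
    let ps := (PySem.Str.splitMax? token "/" 1).getD []
    let base := ps.getD 0 ""
    match PySem.Int.ofStr? (ps.getD 1 "") with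
    | none => none
    | some step =>
      let rng? : Option (List Int) :=
        if base == "*" then some (PySem.List.pyRange min_v (max_v + 1))
        else if PySem.Str.isIn "-" base then
          let bs := (PySem.Str.splitMax? base "-" 1).getD []
          match PySem.Int.ofStr? (bs.getD 0 ""), PySem.Int.ofStr? (bs.getD 1 "") with
          | some a, some b => some (PySem.List.pyRange a (b + 1))
          | _, _ => none
        else
          match PySem.Int.ofStr? base with
          | some v => some (PySem.List.pyRange v (v + 1))
          | none => none
      match rng? with
      | none => none
      | some rng =>
        -- {v for v in rng if (v - min_v) % step == 0}: ZeroDivisionError iff step = 0 and rng ≠ []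
        if step == 0 then (if rng.isEmpty then some PySem.Set.empty else none)
        else some (PySem.Set.ofList (rng.filter (fun v => PySem.Int.mod (v - min_v) step == 0)))
  else if PySem.Str.isIn "-" token then
    let bs := (PySem.Str.splitMax? token "-" 1).getD []
    match PySem.Int.ofStr? (bs.getD 0 ""), PySem.Int.ofStr? (bs.getD 1 "") with
    | some a, some b => some (PySem.Set.ofList (PySem.List.pyRange a (b + 1)))
    | _, _ => none
  else (PySem.Int.ofStr? token).map (fun v => PySem.Set.ofList [v])

def pvLoopA (value min_v max_v : Int) (parts : List String) (allowed : PySem.Set Int) : Bool :=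
  match parts with
  | [] => PySem.Set.contains allowed value
  | p :: rest =>
    let part := PySem.Str.strip p
    if part == "" then pvLoopA value min_v max_v rest allowed
    else
      match pvExpandTokenA part min_v max_v with
      | none => false                                     -- except Exception: return False
      | some s => pvLoopA value min_v max_v rest (PySem.Set.union allowed s)

def cron_field_match_py (value : Int) (spec : String) (min_v : Int) (max_v : Int) : Bool :=
  let spec := PySem.Str.strip spec
  if spec == "*" then true
  else pvLoopA value min_v max_v ((PySem.Str.split? spec ",").getD []) PySem.Set.empty

-- ===== PORT B =====
-- Option models B's exception propagation: `none` = the Python raises (caught by the loop).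
def pvParseRangeB (base : String) (min_v max_v : Int) : Option (Int × Int) :=
  if base == "*" then some (min_v, max_v)
  else if PySem.Str.isIn "-" base then
    let bs := (PySem.Str.splitMax? base "-" 1).getD []
    (PySem.Int.ofStr? (bs.getD 0 "")).bind fun a =>
      (PySem.Int.ofStr? (bs.getD 1 "")).map fun b => (a, b)
  else (PySem.Int.ofStr? base).map fun v => (v, v)

-- any((v - min_v) % step == 0 and v == value for v in rng): short-circuits on the first hit,
-- and the `%` raises (none) at the first element when step = 0.
def pvAnyHitB (value min_v step : Int) : List Int → Option Bool
  | [] => some false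
  | v :: rest =>
    (PySem.Int.mod? (v - min_v) step).bind fun r =>
      if r == 0 && v == value then some true else pvAnyHitB value min_v step rest

def pvTokenMatchesB (value : Int) (token : String) (min_v max_v : Int) : Option Bool :=
  if PySem.Str.isIn "/" token then
    let ps := (PySem.Str.splitMax? token "/" 1).getD []
    (PySem.Int.ofStr? (ps.getD 1 "")).bind fun step =>
      (pvParseRangeB (ps.getD 0 "") min_v max_v).bind fun lohi =>
        pvAnyHitB value min_v step (PySem.List.pyRange lohi.1 (lohi.2 + 1))
  else if PySem.Str.isIn "-" token then
    let bs := (PySem.Str.splitMax? token "-" 1).getD []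
    (PySem.Int.ofStr? (bs.getD 0 "")).bind fun lo =>
      (PySem.Int.ofStr? (bs.getD 1 "")).map fun hi =>
        decide (lo ≤ value) && decide (value ≤ hi)
  else (PySem.Int.ofStr? token).map fun v => value == v

def pvLoopB (value min_v max_v : Int) (parts : List String) (matched : Bool) : Bool :=
  match parts with
  | [] => matched
  | p :: rest =>
    let token := PySem.Str.strip p
    if token == "" then pvLoopB value min_v max_v rest matched
    else
      match pvTokenMatchesB value token min_v max_v with
      | none => false                                     -- except Exception: return False
      | some m => pvLoopB value min_v max_v rest (matched || m)

def cron_field_match_py_alt (value : Int) (spec : String) (min_v : Int) (max_v : Int) : Bool :=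
  let spec := PySem.Str.strip spec
  if spec == "*" then true
  else pvLoopB value min_v max_v ((PySem.Str.split? spec ",").getD []) false

-- ===== PRECONDITION & SPEC =====
def Spec_cron_field_match_py (value : Int) (spec : String) (min_v : Int) (max_v : Int) (out : Bool) : Prop := out = cron_field_match_py_alt value spec min_v max_v
instance (value : Int) (spec : String) (min_v : Int) (max_v : Int) (out : Bool) : Decidable (Spec_cron_field_match_py value spec min_v max_v out) := by unfold Spec_cron_field_match_py; infer_instance

-- ===== CLAIM (what is proved, stated in full; the proofs are below) =====
def Claim_equal_cron_field_match_py : Prop := ∀ (value : Int) (spec : String) (min_v : Int) (max_v : Int), Dom_cron_field_match_py value spec min_v max_v → Spec_cron_field_match_py value spec min_v max_v (cron_field_match_py value spec min_v max_v)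

-- ===== LEMMAS AND PROOFS =====

-- membership of `value` in A's filtered set as a boolean scan
theorem pvContains_ofList_filter (p : Int → Bool) (l : List Int) (value : Int) :
    PySem.Set.contains (PySem.Set.ofList (l.filter p)) value
      = l.any (fun v => p v && v == value) := by
  rw [Bool.eq_iff_iff, PySem.Set.contains_iff, PySem.Set.mem_ofList, List.any_eq_true]
  simp only [List.mem_filter, Bool.and_eq_true, beq_iff_eq]
  constructor
  · rintro ⟨hm, hp⟩; exact ⟨value, hm, hp, rfl⟩
  · rintro ⟨v, hm, hp, rfl⟩; exact ⟨hm, hp⟩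

-- step = 0: `%` raises at the first scanned element (none iff the range is nonempty)
theorem pvAnyHitB_zero (value min_v : Int) (rng : List Int) :
    pvAnyHitB value min_v 0 rng = if rng.isEmpty then some false else none := by
  cases rng with
  | nil => rfl
  | cons v rest => simp [pvAnyHitB, PySem.Int.mod?]

-- step ≠ 0: B's short-circuiting scan computes the boolean `any`
theorem pvAnyHitB_ne_zero (value min_v step : Int) (hs : step ≠ 0) (rng : List Int) :
    pvAnyHitB value min_v step rng
      = some (rng.any (fun v => PySem.Int.mod (v - min_v) step == 0 && v == value)) := by
  induction rng with
  | nil => rfl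
  | cons v rest ih =>
    rw [pvAnyHitB, PySem.Int.mod?, if_neg hs, Option.bind_some, List.any_cons]
    simp only [PySem.Int.mod] at ih ⊢
    by_cases hc : (((v - min_v).fmod step == 0) && v == value) = true
    · rw [if_pos hc, hc, Bool.true_or]
    · rw [if_neg hc, (by simpa using hc :
        (((v - min_v).fmod step == 0) && v == value) = false), Bool.false_or]
      exact ih

-- per-bounds: B's scan of the base range = membership in A's step-filtered set
theorem pvStep_eq (value min_v lo hi step : Int) :
    pvAnyHitB value min_v step (PySem.List.pyRange lo (hi + 1))
      = Option.map (fun s => PySem.Set.contains s value)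
          (if (step == 0) = true then
             (if (PySem.List.pyRange lo (hi + 1)).isEmpty then some PySem.Set.empty else none)
           else
             some (PySem.Set.ofList ((PySem.List.pyRange lo (hi + 1)).filter
               (fun v => PySem.Int.mod (v - min_v) step == 0)))) := by
  by_cases hs : step = 0
  · subst hs
    rw [pvAnyHitB_zero, if_pos (show ((0 : Int) == 0) = true from rfl)]
    by_cases he : (PySem.List.pyRange lo (hi + 1)).isEmpty = true
    · rw [if_pos he, if_pos he]; rfl
    · rw [if_neg he, if_neg he]; rfl
  · rw [pvAnyHitB_ne_zero value min_v step hs,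
      if_neg (by simpa using hs : ¬ ((step == 0) = true)), Option.map_some,
      pvContains_ofList_filter]

theorem pvContains_union {s t : PySem.Set Int} (x : Int) :
    PySem.Set.contains (PySem.Set.union s t) x
      = (PySem.Set.contains s x || PySem.Set.contains t x) := by
  rw [Bool.eq_iff_iff]
  simp [PySem.Set.mem_union]

-- per-token: B's option-valued test is exactly "does A's expanded set contain value"
theorem pvToken_eq (value : Int) (token : String) (min_v max_v : Int) :
    pvTokenMatchesB value token min_v max_v
      = (pvExpandTokenA token min_v max_v).map (fun s => PySem.Set.contains s value) := by
  unfold pvTokenMatchesB pvExpandTokenA pvParseRangeB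
  by_cases h1 : PySem.Str.isIn "/" token = true
  · simp only [h1, if_true]
    cases hstep : PySem.Int.ofStr? (((PySem.Str.splitMax? token "/" 1).getD []).getD 1 "") with
    | none => rfl
    | some step =>
      simp only [Option.bind_some]
      by_cases hb : (((PySem.Str.splitMax? token "/" 1).getD []).getD 0 "" == "*") = true
      · simp only [hb, if_true, Option.bind_some]
        exact pvStep_eq value min_v min_v max_v step
      · simp only [(by simpa using hb :
          (((PySem.Str.splitMax? token "/" 1).getD []).getD 0 "" == "*") = false),
          Bool.false_eq_true, if_false]
        by_cases h2 : PySem.Str.isIn "-" (((PySem.Str.splitMax? token "/" 1).getD []).getD 0 "") = true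
        · simp only [h2, if_true]
          cases ha : PySem.Int.ofStr? (((PySem.Str.splitMax? (((PySem.Str.splitMax? token "/" 1).getD []).getD 0 "") "-" 1).getD []).getD 0 "") with
          | none => rfl
          | some a =>
            cases hb2 : PySem.Int.ofStr? (((PySem.Str.splitMax? (((PySem.Str.splitMax? token "/" 1).getD []).getD 0 "") "-" 1).getD []).getD 1 "") with
            | none => rfl
            | some b => simpa using pvStep_eq value min_v a b step
        · simp only [(by simpa using h2 :
            PySem.Str.isIn "-" (((PySem.Str.splitMax? token "/" 1).getD []).getD 0 "") = false),
            Bool.false_eq_true, if_false]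
          cases hv : PySem.Int.ofStr? (((PySem.Str.splitMax? token "/" 1).getD []).getD 0 "") with
          | none => rfl
          | some v => simpa using pvStep_eq value min_v v v step
  · simp only [(by simpa using h1 : PySem.Str.isIn "/" token = false), Bool.false_eq_true, if_false]
    by_cases h2 : PySem.Str.isIn "-" token = true
    · simp only [h2, if_true]
      cases ha : PySem.Int.ofStr? (((PySem.Str.splitMax? token "-" 1).getD []).getD 0 "") with
      | none => rfl
      | some a =>
        cases hb2 : PySem.Int.ofStr? (((PySem.Str.splitMax? token "-" 1).getD []).getD 1 "") with
        | none => rfl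
        | some b => simp
    · simp only [(by simpa using h2 : PySem.Str.isIn "-" token = false), Bool.false_eq_true, if_false]
      cases hv : PySem.Int.ofStr? token with
      | none => rfl
      | some v => simp [beq_eq_decide]

-- loop invariant: B's running boolean is membership of value in A's accumulated set
theorem pvLoop_eq (value min_v max_v : Int) (parts : List String) (allowed : PySem.Set Int) :
    pvLoopB value min_v max_v parts (PySem.Set.contains allowed value)
      = pvLoopA value min_v max_v parts allowed := by
  induction parts generalizing allowed with
  | nil => rfl
  | cons p rest ih =>
    simp only [pvLoopA, pvLoopB, pvToken_eq]
    by_cases he : (PySem.Str.strip p == "") = true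
    · simp only [he, if_true]; exact ih allowed
    · simp only [he]
      cases hx : pvExpandTokenA (PySem.Str.strip p) min_v max_v with
      | none => rfl
      | some s =>
        simp only [Option.map_some]
        rw [show (PySem.Set.contains allowed value || PySem.Set.contains s value)
              = PySem.Set.contains (PySem.Set.union allowed s) value by
            rw [pvContains_union]]
        exact ih _

-- ===== VERDICT (by name: the statement is the Claim_ definition above) =====
theorem cron_field_match_py_spec : Claim_equal_cron_field_match_py := by
  intro value spec min_v max_v _
  unfold Spec_cron_field_match_py cron_field_match_py cron_field_match_py_alt
  by_cases h : (PySem.Str.strip spec == "*") = true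
  · simp [h]
  · simp only [h]
    rw [← pvLoop_eq]
    rfl
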